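-- pv_equiv track=rewrite | github.com/KudusMusah/problems_solved | Shaha and array colouring.py | solve
-- ===== SOURCE A (Python) =====
-- def solve(nums):
--     nums.sort()
--
--     l, r = 0, len(nums) - 1
--     ans = 0
--     while l < r:
--         ans += (nums[r] - nums[l])
--         l += 1
--         r -= 1
--
--     return ans
-- ===== SOURCE B (Python) =====
-- def solve(nums):
--     def smallest_sum(xs, k):
--         # sum of the k smallest elements of xs (0 <= k <= len(xs)),
--         # by recursive three-way partitioning (quickselect-style), no sorting
--         if k <= 0:
--             return 0
--         p = xs[0]
--         less = [x for x in xs if x < p]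
--         if k <= len(less):
--             return smallest_sum(less, k)
--         eq = xs.count(p)
--         if k <= len(less) + eq:
--             return sum(less) + p * (k - len(less))
--         greater = [x for x in xs if x > p]
--         return sum(less) + p * eq + smallest_sum(greater, k - len(less) - eq)
--
--     n = len(nums)
--     h = n // 2
--     return sum(nums) - smallest_sum(nums, n - h) - smallest_sum(nums, h)
-- ===== Notes on version B (the rewrite author's own statement) =====
-- stated objective: alternative
-- what changed: Drops the sort entirely: the answer equals sum(nums) minus the sum of the n-n//2 smallest minus the sum of the n//2 smallest elements, each computed by a quickselect-style recursive three-way partition (first element as pivot) instead of sorting and pairing symmetric indices.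
import Mathlib
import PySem

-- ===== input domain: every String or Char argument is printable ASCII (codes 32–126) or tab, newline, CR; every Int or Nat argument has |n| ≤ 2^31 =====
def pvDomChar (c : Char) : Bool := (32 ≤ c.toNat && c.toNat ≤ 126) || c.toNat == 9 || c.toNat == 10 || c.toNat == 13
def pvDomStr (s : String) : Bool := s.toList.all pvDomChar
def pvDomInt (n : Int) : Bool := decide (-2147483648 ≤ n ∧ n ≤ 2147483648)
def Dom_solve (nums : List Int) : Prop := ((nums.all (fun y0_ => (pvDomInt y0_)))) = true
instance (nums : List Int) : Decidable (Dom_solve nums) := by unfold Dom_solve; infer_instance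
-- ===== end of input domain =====

-- B avoids sorting: answer = sum(nums) - (sum of the n-n//2 smallest) - (sum of the n//2
-- smallest), each found by quickselect-style three-way partitioning; equivalence is about
-- the RETURN value only (Python A sorts its argument in place, B does not mutate it).

-- ===== PORT A =====
-- the 'while l < r' loop; indices stay in range, so pyGetD is exact
def solveLoop (xs : List Int) (l r ans : Int) : Int :=
  if l < r then
    solveLoop xs (l + 1) (r - 1) (ans + (PySem.List.pyGetD xs r 0 - PySem.List.pyGetD xs l 0))
  else ans
termination_by (r - l).toNat
decreasing_by omega

def solve (nums : List Int) : Int :=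
  let s := PySem.List.sorted nums (fun x => x) false
  solveLoop s 0 ((s.length : Int) - 1) 0

-- ===== PORT B =====
-- Source B's smallest_sum: sum of the k smallest elements by recursive three-way partition.
-- Python raises IndexError on ([], k>0); that call never occurs from solve_alt's
-- invariant (k ≤ len xs), so the [] branch's 0 is arbitrary.
def smallestSum : List Int → Int → Int
  | xs, k =>
    if k ≤ 0 then 0
    else
      match xs with
      | [] => 0
      | p :: t =>
        let l := (p :: t).filter (fun x => x < p)
        if k ≤ (l.length : Int) then smallestSum l k
        else
          let e := (PySem.List.count (p :: t) p : Int)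
          if k ≤ (l.length : Int) + e then l.sum + p * (k - (l.length : Int))
          else
            let g := (p :: t).filter (fun x => p < x)
            l.sum + p * e + smallestSum g (k - (l.length : Int) - e)
termination_by xs _ => xs.length
decreasing_by
  · exact List.length_filter_lt_length_iff_exists.mpr ⟨p, by simp⟩
  · exact List.length_filter_lt_length_iff_exists.mpr ⟨p, by simp⟩

def solve_alt (nums : List Int) : Int :=
  let n := (nums.length : Int)
  let h := PySem.Int.floordiv n 2
  nums.sum - smallestSum nums (n - h) - smallestSum nums h

-- ===== PRECONDITION & SPEC =====
def Spec_solve (nums : List Int) (out : Int) : Prop := out = solve_alt nums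
instance (nums : List Int) (out : Int) : Decidable (Spec_solve nums out) := by unfold Spec_solve; infer_instance

-- ===== CLAIM (what is proved, stated in full; the proofs are below) =====
def Claim_equal_solve : Prop := ∀ (nums : List Int), Dom_solve nums → Spec_solve nums (solve nums)

-- ===== LEMMAS AND PROOFS =====

-- A's loop, viewed structurally: peel the first and last element of the span
def pairSum : List Int → Int
  | [] => 0
  | [_] => 0
  | a :: b :: t => (b :: t).getLastD 0 - a + pairSum ((b :: t).dropLast)
termination_by xs => xs.length
decreasing_by simp

lemma pairSum_short (xs : List Int) (h : xs.length ≤ 1) : pairSum xs = 0 := by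
  rcases xs with _ | ⟨a, _ | ⟨b, t⟩⟩
  · simp [pairSum]
  · simp [pairSum]
  · simp at h

lemma pairSum_cons_concat (a c : Int) (mid : List Int) :
    pairSum (a :: (mid ++ [c])) = c - a + pairSum mid := by
  cases mid with
  | nil => simp [pairSum]
  | cons b t =>
      show pairSum (a :: b :: (t ++ [c])) = _
      rw [pairSum]
      have h1 : b :: (t ++ [c]) = (b :: t) ++ [c] := by simp
      rw [h1, List.getLastD_concat, List.dropLast_concat]

lemma drop_take_split (xs : List Int) (l r : Nat) (hlr : l < r) (hr : r < xs.length) :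
    (xs.drop l).take (r + 1 - l)
      = xs[l]'(by omega) :: (((xs.drop (l + 1)).take (r - 1 - l)) ++ [xs[r]'hr]) := by
  have hd : xs.drop l = xs[l]'(by omega) :: xs.drop (l + 1) := List.drop_eq_getElem_cons (by omega)
  rw [hd]
  have h1 : r + 1 - l = (r - l - 1) + 1 + 1 := by omega
  rw [h1, List.take_succ_cons]
  congr 1
  rw [List.take_add_one]
  have h2 : (xs.drop (l + 1))[r - l - 1]? = some (xs[r]'hr) := by
    rw [List.getElem?_drop]
    have h3 : l + 1 + (r - l - 1) = r := by omega
    rw [h3, List.getElem?_eq_getElem hr]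
  rw [h2]
  have h4 : r - l - 1 = r - 1 - l := by omega
  simp [h4]

lemma solveLoop_eq_pairSum (xs : List Int) :
    ∀ (k l r : Nat) (ans : Int), r - l ≤ k → r < xs.length →
      solveLoop xs (l : Int) (r : Int) ans = ans + pairSum ((xs.drop l).take (r + 1 - l)) := by
  intro k
  induction k with
  | zero =>
      intro l r ans hk hr
      rw [solveLoop]
      have hnl : ¬ ((l : Int) < (r : Int)) := by exact_mod_cast (by omega : ¬ (l < r))
      rw [if_neg hnl]
      have hlen : ((xs.drop l).take (r + 1 - l)).length ≤ 1 := by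
        simp [List.length_take, List.length_drop]; omega
      rw [pairSum_short _ hlen]; ring
  | succ k ih =>
      intro l r ans hk hr
      rw [solveLoop]
      by_cases hlr : l < r
      · rw [if_pos (by exact_mod_cast hlr)]
        have e1 : (l : Int) + 1 = ((l + 1 : Nat) : Int) := by push_cast; ring
        have e2 : (r : Int) - 1 = ((r - 1 : Nat) : Int) := by omega
        rw [e1, e2, ih (l + 1) (r - 1) _ (by omega) (by omega)]
        have hgl : PySem.List.pyGetD xs (l : Int) 0 = xs[l]'(by omega) := by
          simp [PySem.List.pyGetD_natCast, List.getD_eq_getElem?_getD,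
                List.getElem?_eq_getElem (show l < xs.length by omega)]
        have hgr : PySem.List.pyGetD xs (r : Int) 0 = xs[r]'hr := by
          simp [PySem.List.pyGetD_natCast, List.getD_eq_getElem?_getD,
                List.getElem?_eq_getElem hr]
        rw [hgl, hgr, drop_take_split xs l r hlr hr, pairSum_cons_concat]
        have h3 : r - 1 + 1 - (l + 1) = r - 1 - l := by omega
        rw [h3]; ring
      · rw [if_neg (by exact_mod_cast hlr)]
        have hlen : ((xs.drop l).take (r + 1 - l)).length ≤ 1 := by
          simp [List.length_take, List.length_drop]; omega
        rw [pairSum_short _ hlen]; ring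

-- the loop's value in terms of half-sums of the sorted list
lemma pairSum_halves : ∀ (n : Nat) (xs : List Int), xs.length ≤ n →
    pairSum xs = (xs.drop (xs.length - xs.length / 2)).sum - (xs.take (xs.length / 2)).sum := by
  intro n
  induction n with
  | zero =>
      intro xs h
      have hx : xs = [] := List.eq_nil_of_length_eq_zero (by omega)
      subst hx; simp [pairSum]
  | succ n ih =>
      intro xs h
      rcases xs with _ | ⟨a, _ | ⟨b, t⟩⟩
      · simp [pairSum]
      · simp [pairSum]
      · obtain ⟨zs, c, hzc⟩ := (List.eq_nil_or_concat' (b :: t)).resolve_left (by simp)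
        rw [hzc, pairSum_cons_concat]
        have hlzs : t.length = zs.length := by
          have := congrArg List.length hzc; simp at this; omega
        have hm : zs.length ≤ n := by simp at h; omega
        rw [ih zs hm]
        have hlen : (a :: (zs ++ [c])).length = zs.length + 2 := by simp
        rw [hlen]
        have hsub : zs.length + 2 - (zs.length + 2) / 2 = (zs.length - zs.length / 2) + 1 := by
          omega
        have hdiv : (zs.length + 2) / 2 = zs.length / 2 + 1 := by omega
        rw [hsub, hdiv]
        have htake : (a :: (zs ++ [c])).take (zs.length / 2 + 1)
            = a :: zs.take (zs.length / 2) := by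
          rw [List.take_succ_cons, List.take_append_of_le_length (by omega)]
        have hdrop : (a :: (zs ++ [c])).drop ((zs.length - zs.length / 2) + 1)
            = zs.drop (zs.length - zs.length / 2) ++ [c] := by
          rw [List.drop_succ_cons, List.drop_append_of_le_length (by omega)]
        rw [htake, hdrop]
        simp [List.sum_append]; ring

-- three-way partition of xs at p is a permutation of xs
lemma partition_perm (xs : List Int) (p : Int) :
    (xs.filter (fun x => x < p) ++ xs.filter (fun x => x == p) ++ xs.filter (fun x => p < x)).Perm
      xs := by
  induction xs with
  | nil => simp
  | cons a t ih =>
      rcases lt_trichotomy a p with hlt | heq | hgt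
      · rw [List.filter_cons_of_pos (by simpa using hlt),
          List.filter_cons_of_neg (by simp; omega),
          List.filter_cons_of_neg (by simp; omega)]
        simpa using ih.cons a
      · subst heq
        rw [List.filter_cons_of_neg (by simp),
          List.filter_cons_of_pos (by simp),
          List.filter_cons_of_neg (by simp)]
        have e : t.filter (fun x => x < a) ++ (a :: t.filter (fun x => x == a))
              ++ t.filter (fun x => a < x)
            = t.filter (fun x => x < a)
              ++ a :: (t.filter (fun x => x == a) ++ t.filter (fun x => a < x)) := by simp
        rw [e]
        exact List.perm_middle.trans
          (List.Perm.cons a (by simpa [List.append_assoc] using ih))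
      · rw [List.filter_cons_of_neg (by simp; omega),
          List.filter_cons_of_neg (by simp; omega),
          List.filter_cons_of_pos (by simpa using hgt)]
        exact List.perm_middle.trans (List.Perm.cons a ih)

-- sorted(xs) is the concatenation sorted(less) ++ equal ++ sorted(greater)
lemma sorted_partition (xs : List Int) (p : Int) :
    PySem.List.sorted xs (fun x => x) false
      = PySem.List.sorted (xs.filter (fun x => x < p)) (fun x => x) false
        ++ xs.filter (fun x => x == p)
        ++ PySem.List.sorted (xs.filter (fun x => p < x)) (fun x => x) false := by
  apply PySem.List.sorted_id_eq_of_perm_of_pairwise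
  · refine List.Perm.trans ?_ (partition_perm xs p)
    exact List.Perm.append (List.Perm.append (PySem.List.sorted_perm _ _ _) (List.Perm.refl _))
      (PySem.List.sorted_perm _ _ _)
  · have hless : ∀ x ∈ PySem.List.sorted (xs.filter (fun x => x < p)) (fun x => x) false,
        x < p := by
      intro x hx
      have := (PySem.List.mem_sorted _ _ _ _).mp hx
      simp [List.mem_filter] at this; exact this.2
    have heq : ∀ x ∈ xs.filter (fun x => x == p), x = p := by
      intro x hx; simp [List.mem_filter] at hx; exact hx.2
    have hgt : ∀ x ∈ PySem.List.sorted (xs.filter (fun x => p < x)) (fun x => x) false,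
        p < x := by
      intro x hx
      have := (PySem.List.mem_sorted _ _ _ _).mp hx
      simp [List.mem_filter] at this; exact this.2
    rw [List.pairwise_append]
    refine ⟨?_, ?_, ?_⟩
    · rw [List.pairwise_append]
      refine ⟨by simpa using PySem.List.sorted_pairwise _ _, ?_, ?_⟩
      · refine List.Pairwise.imp ?_ (List.pairwise_of_forall_mem_list
          (l := xs.filter (fun x => x == p)) (r := fun a b => a = p ∧ b = p)
          (fun a ha b hb => ⟨heq a ha, heq b hb⟩))
        rintro a b ⟨rfl, rfl⟩; exact le_refl _
      · intro a ha b hb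
        have h1 := hless a ha; have h2 := heq b hb; omega
    · simpa using PySem.List.sorted_pairwise (xs.filter (fun x => p < x)) (fun x => x)
    · intro a ha b hb
      rcases List.mem_append.mp ha with h | h
      · have h1 := hless a h; have h2 := hgt b hb; omega
      · have h1 := heq a h; have h2 := hgt b hb; omega

lemma sum_take_append (A B : List Int) (n : Nat) :
    ((A ++ B).take n).sum = (A.take n).sum + (B.take (n - A.length)).sum := by
  rw [List.take_append, List.sum_append]

-- smallest_sum computes the sum of the first k of the sorted list
lemma smallestSum_eq : ∀ (n : Nat) (xs : List Int) (k : Int), xs.length ≤ n →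
    0 ≤ k → k ≤ (xs.length : Int) →
    smallestSum xs k = ((PySem.List.sorted xs (fun x => x) false).take k.toNat).sum := by
  intro n
  induction n with
  | zero =>
      intro xs k hn h0 hk
      have hx : xs = [] := List.eq_nil_of_length_eq_zero (by omega)
      subst hx
      have hk0 : k = 0 := le_antisymm (by simpa using hk) h0
      subst hk0
      rw [smallestSum.eq_def]; simp
  | succ n ih =>
      intro xs k hn h0 hk
      by_cases hk0 : k ≤ 0
      · have hk0' : k = 0 := le_antisymm hk0 h0
        subst hk0'; rw [smallestSum.eq_def]; simp
      rcases xs with _ | ⟨p, t⟩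
      · simp at hk; omega
      rw [smallestSum.eq_def]
      simp only [if_neg hk0]
      set L := (p :: t).filter (fun x => x < p) with hL
      set E := (p :: t).filter (fun x => x == p) with hE
      set G := (p :: t).filter (fun x => p < x) with hG
      have hErep : E = List.replicate ((p :: t).count p) p := by
        rw [hE]; exact List.filter_beq p
      have hEcnt : E.length = (p :: t).count p := by rw [hErep, List.length_replicate]
      have hlenpart : L.length + E.length + G.length = (p :: t).length := by
        have h := (partition_perm (p :: t) p).length_eq
        simp only [List.length_append] at h
        rw [hL, hE, hG]; omega
      have hLlt : L.length < (p :: t).length := by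
        rw [hL]; exact List.length_filter_lt_length_iff_exists.mpr ⟨p, by simp⟩
      have hGlt : G.length < (p :: t).length := by
        rw [hG]; exact List.length_filter_lt_length_iff_exists.mpr ⟨p, by simp⟩
      have hn' : (p :: t).length ≤ n + 1 := hn
      have hcount : PySem.List.count (p :: t) p = (p :: t).count p := PySem.List.count_eq _ _
      set X := PySem.List.sorted L (fun x => x) false with hX
      set G' := PySem.List.sorted G (fun x => x) false with hG'
      have hXlen : X.length = L.length := (PySem.List.sorted_perm _ _ _).length_eq
      have hXsum : X.sum = L.sum := (PySem.List.sorted_perm _ _ _).sum_eq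
      have hsplit : PySem.List.sorted (p :: t) (fun x => x) false = X ++ E ++ G' := by
        rw [hX, hG', hE, hL]; exact sorted_partition (p :: t) p
      rw [hsplit, sum_take_append (X ++ E) G' k.toNat, sum_take_append X E k.toNat,
        List.length_append, hXlen, hEcnt]
      by_cases c1 : k ≤ (L.length : Int)
      · rw [if_pos c1]
        have h1 : k.toNat ≤ L.length := by omega
        have h2 : k.toNat - L.length = 0 := by omega
        have h3 : k.toNat - (L.length + (p :: t).count p) = 0 := by omega
        rw [h2, h3]
        simp only [List.take_zero, List.sum_nil, add_zero]
        exact ih L k (by omega) h0 c1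
      · rw [if_neg c1, hcount]
        have hLk : L.length ≤ k.toNat := by omega
        rw [List.take_of_length_le (by omega : X.length ≤ k.toNat), hXsum]
        by_cases c2 : k ≤ (L.length : Int) + ((p :: t).count p : Int)
        · rw [if_pos c2]
          have h2 : k.toNat - L.length ≤ (p :: t).count p := by omega
          have h3 : k.toNat - (L.length + (p :: t).count p) = 0 := by omega
          rw [h3]
          simp only [List.take_zero, List.sum_nil, add_zero]
          rw [hErep, List.take_replicate, List.sum_replicate, nsmul_eq_mul]
          have hmin : ((min (k.toNat - L.length) ((p :: t).count p) : Nat) : Int)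
              = k - (L.length : Int) := by omega
          rw [hmin]; ring
        · rw [if_neg c2]
          have h2 : L.length + (p :: t).count p ≤ k.toNat := by omega
          rw [List.take_of_length_le (by omega : E.length ≤ k.toNat - L.length)]
          have hEsum : E.sum = ((p :: t).count p : Int) * p := by
            rw [hErep, List.sum_replicate, nsmul_eq_mul]
          have hkk : k.toNat - (L.length + (p :: t).count p)
              = (k - (L.length : Int) - ((p :: t).count p : Int)).toNat := by omega
          have hGlen : (k - (L.length : Int) - ((p :: t).count p : Int)) ≤ (G.length : Int) := by
            simp only [List.length_cons] at hlenpart hk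
            omega
          rw [hkk, ← ih G (k - (L.length : Int) - ((p :: t).count p : Int))
            (by simp only [List.length_cons] at hGlt hn'; omega)
            (by omega) hGlen]
          rw [hEsum]; ring

-- ===== VERDICT (by name: the statement is the Claim_ definition above) =====
theorem solve_spec : Claim_equal_solve := by
  intro nums _
  unfold Spec_solve solve solve_alt
  set s := PySem.List.sorted nums (fun x => x) false with hs
  have hlen : s.length = nums.length := (PySem.List.sorted_perm _ _ _).length_eq
  have hsum : s.sum = nums.sum := (PySem.List.sorted_perm _ _ _).sum_eq
  have hh : PySem.Int.floordiv (nums.length : Int) 2 = ((nums.length / 2 : Nat) : Int) := by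
    exact_mod_cast PySem.Int.floordiv_natCast nums.length 2
  have hloop : solveLoop s 0 ((s.length : Int) - 1) 0
      = (s.drop (s.length - s.length / 2)).sum - (s.take (s.length / 2)).sum := by
    by_cases hnil : s = []
    · rw [hnil, solveLoop]; simp
    · have hpos : 0 < s.length := List.length_pos_of_ne_nil hnil
      obtain ⟨m, hm⟩ : ∃ m, s.length = m + 1 := ⟨s.length - 1, by omega⟩
      have e : (s.length : Int) - 1 = ((m : Nat) : Int) := by omega
      have key := solveLoop_eq_pairSum s m 0 m 0 (le_refl _) (by omega)
      simp only [Nat.cast_zero] at key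
      rw [e, key, List.drop_zero]
      have ht : m + 1 - 0 = s.length := by omega
      rw [ht, List.take_length, pairSum_halves s.length s (le_refl _)]
      ring
  rw [hloop]
  have hdrop : (s.drop (s.length - s.length / 2)).sum
      = nums.sum - (s.take (s.length - s.length / 2)).sum := by
    have := congrArg List.sum (List.take_append_drop (s.length - s.length / 2) s)
    rw [List.sum_append] at this
    omega
  have hk1 : smallestSum nums ((nums.length : Int) - PySem.Int.floordiv (nums.length : Int) 2)
      = (s.take (s.length - s.length / 2)).sum := by
    rw [hh]
    have e : (nums.length : Int) - ((nums.length / 2 : Nat) : Int)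
        = ((nums.length - nums.length / 2 : Nat) : Int) := by
      have := Nat.div_le_self nums.length 2; omega
    rw [e, smallestSum_eq nums.length nums _ (le_refl _) (by positivity) (by
      exact_mod_cast Nat.sub_le _ _)]
    rw [← hs, hlen]
    simp
  have hk2 : smallestSum nums (PySem.Int.floordiv (nums.length : Int) 2)
      = (s.take (s.length / 2)).sum := by
    rw [hh, smallestSum_eq nums.length nums _ (le_refl _) (by positivity) (by
      exact_mod_cast Nat.div_le_self nums.length 2)]
    rw [← hs, hlen]
    congr 1
  show (s.drop (s.length - s.length / 2)).sum - (s.take (s.length / 2)).sum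
      = nums.sum - smallestSum nums ((nums.length : Int) - PySem.Int.floordiv (nums.length : Int) 2)
        - smallestSum nums (PySem.Int.floordiv (nums.length : Int) 2)
  rw [hdrop, hk1, hk2]
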